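-- pv_equiv track=rewrite | github.com/ad3002/Lyrebird | trseeker/tools/sa_tools.py | iterate_sa_corpus
-- ===== SOURCE A (Python) =====
-- def iterate_sa_corpus(corpus):
--     ''' Yields corpus texts. Corpus is $ delimited text file.
--     '''
--     left_pos = None
--     right_pos = None
--     N = len(corpus)
--     while True:
--         if left_pos is None:
--             left_pos = corpus.find("$", 0)
--             if left_pos < 0:
--                 yield corpus
--                 break
--             yield corpus[0:left_pos]
--         right_pos = corpus.find("$", left_pos + 1)
--         if left_pos == N - 1:
--             break
--         if right_pos < 0:
--             yield corpus[left_pos + 1:]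
--             break
--         yield corpus[left_pos + 1:right_pos]
--         left_pos = right_pos
-- ===== SOURCE B (Python) =====
-- def iterate_sa_corpus(corpus):
--     ''' Yields corpus texts. Corpus is $ delimited text file.
--     '''
--     parts = corpus.split('$')
--     if corpus.endswith('$'):
--         parts = parts[:-1]
--     yield from parts
-- ===== Notes on version B (the rewrite author's own statement) =====
-- stated objective: idiomatic
-- what changed: Replaces A's manual find/slice scanning loop over left/right positions with a single str.split('$') call, dropping the trailing empty field when the corpus ends in '$'.
import Mathlib
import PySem

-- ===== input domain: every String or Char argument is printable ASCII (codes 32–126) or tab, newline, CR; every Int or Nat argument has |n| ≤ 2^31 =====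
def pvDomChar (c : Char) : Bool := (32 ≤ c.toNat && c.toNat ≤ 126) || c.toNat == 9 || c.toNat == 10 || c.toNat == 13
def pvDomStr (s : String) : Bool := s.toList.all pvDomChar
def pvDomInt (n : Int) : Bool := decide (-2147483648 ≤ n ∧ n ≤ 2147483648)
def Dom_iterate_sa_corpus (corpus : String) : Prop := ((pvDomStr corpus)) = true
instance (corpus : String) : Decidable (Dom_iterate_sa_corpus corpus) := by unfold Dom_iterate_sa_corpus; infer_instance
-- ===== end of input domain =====

-- B replaces A's manual find/slice scanning loop with a single split('$') call, dropping the
-- trailing empty field when the corpus ends in '$' (idiomatic, same O(n) cost).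
-- Both Pythons are generators; the equivalence is about the yielded sequence as a list.

-- ===== PORT A =====
-- literal port of A's while loop; the state is left_pos; fuel (≥ number of remaining
-- iterations, supplied as len(corpus) at the call site) only makes the recursion structural
def pvAGo : List Char → Nat → Nat → List (List Char)
  | _, 0, _ => []
  | cs, fuel + 1, left =>
    let right := PySem.Chars.findFrom cs ['$'] ((left + 1 : Nat) : Int) none
    if left = cs.length - 1 then []
    else if right < 0 then
      [PySem.Chars.slice cs (some ((left + 1 : Nat) : Int)) none]
    else
      PySem.Chars.slice cs (some ((left + 1 : Nat) : Int)) (some right) ::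
        pvAGo cs fuel right.toNat

def iterate_sa_corpus (corpus : String) : List String :=
  let cs := corpus.toList
  let left0 := PySem.Str.find corpus "$"
  if left0 < 0 then [corpus]
  else
    String.ofList (PySem.Chars.slice cs none (some left0)) ::
      (pvAGo cs cs.length left0.toNat).map String.ofList

-- ===== PORT B =====
def iterate_sa_corpus_alt (corpus : String) : List String :=
  let parts := (List.splitOn '$' corpus.toList).map String.ofList
  if PySem.Str.endswith corpus "$" then PySem.List.slice parts none (some (-1)) else parts

-- ===== PRECONDITION & SPEC =====
def Spec_iterate_sa_corpus (corpus : String) (out : List String) : Prop := out = iterate_sa_corpus_alt corpus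
instance (corpus : String) (out : List String) : Decidable (Spec_iterate_sa_corpus corpus out) := by unfold Spec_iterate_sa_corpus; infer_instance

-- ===== CLAIM (what is proved, stated in full; the proofs are below) =====
def Claim_equal_iterate_sa_corpus : Prop := ∀ (corpus : String), Dom_iterate_sa_corpus corpus → Spec_iterate_sa_corpus corpus (iterate_sa_corpus corpus)

-- ===== LEMMAS AND PROOFS =====

theorem pvFindGo_eq (cs : List Char) (k : Nat) :
    PySem.Chars.find.go ['$'] cs k =
      if '$' ∈ cs then ((k : Int) + ((cs.takeWhile (· ≠ '$')).length : Int)) else -1 := by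
  induction cs generalizing k with
  | nil => simp [PySem.Chars.find.go]
  | cons c t ih =>
    rw [PySem.Chars.find.go]
    by_cases hc : c = '$'
    · subst hc; simp [List.isPrefixOf]
    · have hc' : ('$' : Char) ≠ c := Ne.symm hc
      by_cases hm : '$' ∈ t
      · simp [List.isPrefixOf, ih, hc, hc', hm]
        push_cast; ring
      · simp [List.isPrefixOf, ih, hc, hc', hm]

theorem pvFind_eq (cs : List Char) :
    PySem.Chars.find cs ['$'] =
      if '$' ∈ cs then (((cs.takeWhile (· ≠ '$')).length : Int)) else -1 := by
  rw [PySem.Chars.find, pvFindGo_eq]; simp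

theorem pvTakeWhile_lt (cs : List Char) (h : '$' ∈ cs) :
    (cs.takeWhile (· ≠ '$')).length < cs.length := by
  induction cs with
  | nil => simp at h
  | cons c t ih =>
    by_cases hc : c = '$'
    · subst hc; simp
    · rcases List.mem_cons.mp h with h1 | h2
      · exact absurd h1.symm hc
      · simpa [List.takeWhile_cons, hc, Ne.symm hc] using Nat.succ_lt_succ (ih h2)



-- B's trim condition, on char lists: "ends with '$'", extended with the empty list
def pvCond (t : List Char) : Bool := t.isEmpty || (t.getLast? == some '$')

theorem pvCond_iff (t : List Char) : pvCond t = true ↔ (t = [] ∨ t.getLast? = some '$') := by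
  simp [pvCond, List.isEmpty_iff]

theorem pvEnds_iff (t : List Char) (h : t ≠ []) :
    (['$'].isSuffixOf t = true) ↔ t.getLast? = some '$' := by
  rw [List.isSuffixOf_iff_suffix, List.getLast?_eq_some_iff]
  constructor
  · rintro ⟨s, rfl⟩; exact ⟨s, rfl⟩
  · rintro ⟨s, rfl⟩; exact ⟨s, rfl⟩

theorem pvSplit_not_mem (t : List Char) (h : '$' ∉ t) : List.splitOn '$' t = [t] := by
  induction t with
  | nil => rfl
  | cons c r ih =>
    have hc : ¬ ((c == '$') = true) := by
      simp only [beq_iff_eq]; rintro rfl; exact h List.mem_cons_self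
    have hr : '$' ∉ r := fun hm => h (List.mem_cons_of_mem _ hm)
    simp only [List.splitOn] at ih ⊢
    rw [List.splitOnP_cons, if_neg hc, ih hr]
    rfl

theorem pvSplit_step (t : List Char) (h : '$' ∈ t) :
    List.splitOn '$' t =
      t.takeWhile (· ≠ '$') :: List.splitOn '$' (t.drop ((t.takeWhile (· ≠ '$')).length + 1)) := by
  induction t with
  | nil => simp at h
  | cons c r ih =>
    by_cases hc : c = '$'
    · subst hc
      simp [List.splitOn, List.splitOnP_cons]
    · rcases List.mem_cons.mp h with h1 | h2
      · exact absurd h1.symm hc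
      · have hbeq : ¬ ((c == '$') = true) := by simpa using hc
        simp only [List.takeWhile_cons, decide_eq_true_eq]
        rw [if_pos hc]
        simp only [List.length_cons, List.drop_succ_cons]
        simp only [List.splitOn] at ih ⊢
        rw [List.splitOnP_cons, if_neg hbeq, ih h2]
        rfl

theorem pvSplit_ne_nil (t : List Char) : List.splitOn '$' t ≠ [] :=
  List.splitOnP_ne_nil _ t

theorem pvDropLast_cons {α : Type} (a : α) (l : List α) (h : l ≠ []) :
    (a :: l).dropLast = a :: l.dropLast := by
  cases l with
  | nil => exact absurd rfl h
  | cons b m => rfl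

-- decomposition of t at its first '$'
theorem pvDecomp (t : List Char) (h : '$' ∈ t) :
    t = t.takeWhile (· ≠ '$') ++ '$' :: t.drop ((t.takeWhile (· ≠ '$')).length + 1) := by
  induction t with
  | nil => simp at h
  | cons c r ih =>
    by_cases hc : c = '$'
    · subst hc; simp
    · rcases List.mem_cons.mp h with h1 | h2
      · exact absurd h1.symm hc
      · simp only [List.takeWhile_cons, decide_eq_true_eq, if_pos hc, List.length_cons,
          List.drop_succ_cons, List.cons_append, List.cons.injEq, true_and]
        exact ih h2

theorem pvTake_takeWhile (t : List Char) :
    t.take ((t.takeWhile (· ≠ '$')).length) = t.takeWhile (· ≠ '$') :=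
  (List.prefix_iff_eq_take.mp (List.takeWhile_prefix _)).symm

theorem pvCond_step (t : List Char) (h : '$' ∈ t) :
    pvCond (t.drop ((t.takeWhile (· ≠ '$')).length + 1)) = pvCond t := by
  rw [Bool.eq_iff_iff, pvCond_iff, pvCond_iff]
  have hne : t ≠ [] := by rintro rfl; simp at h
  have hdec := pvDecomp t h
  set u := t.drop ((t.takeWhile (· ≠ '$')).length + 1) with hu
  by_cases hun : u = []
  · refine iff_of_true (Or.inl hun) (Or.inr ?_)
    rw [List.getLast?_eq_some_iff]
    refine ⟨t.takeWhile (· ≠ '$'), ?_⟩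
    conv_lhs => rw [hdec]
    rw [hun]
  · have hgl : t.getLast? = u.getLast? := by
      conv_lhs => rw [hdec]
      rw [List.getLast?_append_of_ne_nil _ (by simp : ('$' :: u) ≠ [])]
      rw [show ('$' :: u) = ['$'] ++ u from rfl, List.getLast?_append_of_ne_nil _ hun]
    rw [hgl]
    simp [hun, hne]

-- A's loop on left_pos computes B's split-and-trim expression on the tail after left_pos
theorem pvAGo_eq (fuel : Nat) : ∀ (cs : List Char) (left : Nat), left < cs.length →
    cs.length - left ≤ fuel →
    pvAGo cs fuel left =
      (if pvCond (cs.drop (left + 1)) then (List.splitOn '$' (cs.drop (left + 1))).dropLast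
       else List.splitOn '$' (cs.drop (left + 1))) := by
  induction fuel with
  | zero => intro cs left h hn; omega
  | succ n ih =>
    intro cs left h hn
    simp only [pvAGo]
    have htl : (cs.drop (left + 1)).length = cs.length - (left + 1) := List.length_drop ..
    by_cases hlast : left = cs.length - 1
    · have htn : cs.drop (left + 1) = [] := by
        rw [← List.length_eq_zero_iff]; omega
      have hc0 : pvCond ([] : List Char) = true := rfl
      rw [htn, if_pos hc0, if_pos hlast]
      simp [List.splitOn]
    · rw [if_neg hlast]
      have hk : left + 1 ≤ cs.length := by omega
      have htne : cs.drop (left + 1) ≠ [] := by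
        rw [← List.length_pos_iff]; omega
      have hff := PySem.Chars.findFrom_natCast cs ['$'] (left + 1) hk
      rw [pvFind_eq] at hff
      by_cases hm : '$' ∈ cs.drop (left + 1)
      · rw [if_pos hm] at hff
        have hne1 : ¬ (((((cs.drop (left+1)).takeWhile (· ≠ '$')).length : Nat) : Int) = -1) := by
          omega
        rw [if_neg hne1] at hff
        set i := ((cs.drop (left + 1)).takeWhile (· ≠ '$')).length with hi
        have hil : i < (cs.drop (left + 1)).length := pvTakeWhile_lt _ hm
        have hval : PySem.Chars.findFrom cs ['$'] ((left + 1 : Nat) : Int) none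
            = ((left + 1 + i : Nat) : Int) := by rw [hff]; push_cast; ring
        simp only [hval]
        rw [if_neg (by omega : ¬ (((left + 1 + i : Nat) : Int) < 0))]
        have htoNat : ((left + 1 + i : Nat) : Int).toNat = left + 1 + i := Int.toNat_natCast _
        simp only [htoNat]
        rw [ih cs (left + 1 + i) (by omega) (by omega)]
        have hdrop : cs.drop (left + 1 + i + 1) = (cs.drop (left + 1)).drop (i + 1) := by
          rw [List.drop_drop]; ring_nf
        have hslice : PySem.Chars.slice cs (some ((left + 1 : Nat) : Int))
            (some ((left + 1 + i : Nat) : Int)) = (cs.drop (left + 1)).takeWhile (· ≠ '$') := by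
          rw [PySem.Chars.slice_eq_listSlice, PySem.List.slice_natCast]
          rw [show left + 1 + i - (left + 1) = i from by omega]
          rw [hi, pvTake_takeWhile]
        rw [hslice, hdrop]
        have hcond := pvCond_step (cs.drop (left + 1)) hm
        rw [← hi] at hcond
        have hsplit := pvSplit_step (cs.drop (left + 1)) hm
        rw [← hi] at hsplit
        rw [hsplit]
        by_cases hc : pvCond (cs.drop (left + 1)) = true
        · rw [if_pos hc, if_pos (hcond.trans hc),
            pvDropLast_cons _ _ (pvSplit_ne_nil _)]
        · rw [if_neg hc, if_neg (fun hh => hc ((hcond.symm).trans hh))]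
      · rw [if_neg hm] at hff
        have hffv : PySem.Chars.findFrom cs ['$'] ((left + 1 : Nat) : Int) none = -1 := by
          rw [hff]; norm_num
        simp only [hffv]
        rw [if_pos (by norm_num : (-1 : Int) < 0)]
        have hnc : ¬ pvCond (cs.drop (left + 1)) = true := by
          rw [pvCond_iff]
          rintro (h1 | h2)
          · exact htne h1
          · rw [List.getLast?_eq_some_iff] at h2
            obtain ⟨ys, hys⟩ := h2
            exact hm (by rw [hys]; simp)
        rw [if_neg hnc, pvSplit_not_mem _ hm]
        rw [PySem.Chars.slice_eq_listSlice, PySem.List.slice_from_natCast]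

-- ===== VERDICT (by name: the statement is the Claim_ definition above) =====
theorem iterate_sa_corpus_spec : Claim_equal_iterate_sa_corpus := by
  unfold Claim_equal_iterate_sa_corpus
  intro corpus _
  unfold Spec_iterate_sa_corpus iterate_sa_corpus iterate_sa_corpus_alt
  dsimp only
  have hdollar : ("$" : String).toList = ['$'] := rfl
  have hfind : PySem.Str.find corpus "$" = PySem.Chars.find corpus.toList ['$'] := by
    rw [PySem.Str.find, hdollar]
  have hends : PySem.Str.endswith corpus "$" = ['$'].isSuffixOf corpus.toList := by
    rw [PySem.Str.endswith_eq, hdollar]; rfl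
  rw [PySem.List.slice_to_neg_one]
  by_cases hm : '$' ∈ corpus.toList
  · have hne : corpus.toList ≠ [] := by rintro hh; rw [hh] at hm; simp at hm
    have hfv : PySem.Str.find corpus "$"
        = (((corpus.toList.takeWhile (· ≠ '$')).length : Nat) : Int) := by
      rw [hfind, pvFind_eq, if_pos hm]
    rw [if_neg (by rw [hfv]; omega)]
    simp only [hfv, Int.toNat_natCast]
    rw [pvAGo_eq corpus.toList.length corpus.toList _ (pvTakeWhile_lt _ hm) (by omega)]
    have hslice : PySem.Chars.slice corpus.toList none
        (some (((corpus.toList.takeWhile (· ≠ '$')).length : Nat) : Int))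
        = corpus.toList.takeWhile (· ≠ '$') := by
      rw [PySem.Chars.slice_eq_listSlice, PySem.List.slice_to_natCast, pvTake_takeWhile]
    rw [hslice, pvSplit_step _ hm]
    have hcond := pvCond_step corpus.toList hm
    by_cases hc : pvCond corpus.toList = true
    · have hlast : corpus.toList.getLast? = some '$' := by
        rcases (pvCond_iff _).mp hc with h1 | h2; exact absurd h1 hne; exact h2
      rw [hends]
      rw [show (['$'].isSuffixOf corpus.toList) = true from (pvEnds_iff _ hne).mpr hlast]
      rw [if_pos rfl, if_pos (hcond.trans hc), List.map_cons]
      rw [pvDropLast_cons _ _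
        (by simp only [ne_eq, List.map_eq_nil_iff]; exact pvSplit_ne_nil _)]
      rw [List.map_dropLast]
    · have hsfx : ['$'].isSuffixOf corpus.toList = false := by
        rw [Bool.eq_false_iff]
        intro hh
        exact hc ((pvCond_iff _).mpr (Or.inr ((pvEnds_iff _ hne).mp hh)))
      rw [hends, hsfx, if_neg (by simp : ¬ (false = true)),
        if_neg (fun hh => hc ((hcond.symm).trans hh)), List.map_cons]
  · have hfv : PySem.Str.find corpus "$" = -1 := by
      rw [hfind, pvFind_eq, if_neg hm]
    rw [if_pos (by rw [hfv]; norm_num : PySem.Str.find corpus "$" < 0)]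
    have hlast : PySem.Str.endswith corpus "$" = false := by
      rw [hends, Bool.eq_false_iff]
      intro hh
      rw [List.isSuffixOf_iff_suffix] at hh
      exact hm (hh.subset (by simp))
    rw [hlast, if_neg (by simp : ¬ (false = true))]
    rw [pvSplit_not_mem _ hm, List.map_cons, List.map_nil]
    rw [String.ofList_toList]
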